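-- pv_equiv track=rewrite | github.com/pnkmem433/pnk_kdh | tasmota/Tasmota/lib/libesp32/berry/berry_port/be_solidifylib.py | toidentifier
-- ===== SOURCE A (Python) =====
-- def _hexdigit(v):
--     """Convert a nibble (0-15) to a hex digit character (uppercase)."""
--     v = v & 0xF
--     if v >= 10:
--         return chr(v - 10 + ord('A'))
--     return chr(v + ord('0'))
--
-- def toidentifier(s):
--     """Encode a string to a C-identifier-safe string using _X escape scheme.
--     Operates on raw bytes to match C behavior.
--     Returns the encoded string.
--     """
--     # Convert to raw bytes using latin-1 (transparent byte mapping used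
--     # internally by the Python port to represent C byte strings)
--     if isinstance(s, str):
--         s = s.encode('latin-1')
--     parts = []
--     i = 0
--     while i < len(s):
--         if i + 1 < len(s) and s[i] == ord('_') and s[i + 1] == ord('X'):
--             parts.append('_X_')
--             i += 2
--         elif (chr(s[i]).isalnum() if s[i] < 128 else False) or s[i] == ord('_'):
--             parts.append(chr(s[i]))
--             i += 1
--         else:  # escape
--             b = s[i]
--             parts.append('_X')
--             parts.append(_hexdigit((b & 0xF0) >> 4))
--             parts.append(_hexdigit(b & 0x0F))
--             i += 1
--     return ''.join(parts)
-- ===== SOURCE B (Python) =====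
-- def toidentifier(s):
--     """Encode a string to a C-identifier-safe string using _X escape scheme.
--     Split on the literal '_X' (whose escape is '_X_'), escape each segment
--     byte-by-byte, and rejoin with '_X_'.
--     """
--     if isinstance(s, str):
--         s = s.encode('latin-1')
--     def esc(seg):
--         return ''.join(chr(b) if (48 <= b <= 57 or 65 <= b <= 90
--                                   or 97 <= b <= 122 or b == 0x5F)
--                        else '_X%02X' % b
--                        for b in seg)
--     return '_X_'.join(esc(seg) for seg in s.split(b'_X'))
-- ===== Notes on version B (the rewrite author's own statement) =====
-- stated objective: faster
-- what changed: Replaced the index-based while-loop with per-position '_X' lookahead by splitting the byte string on the literal '_X' once, escaping each segment with a per-byte comprehension, and rejoining the segments with '_X_'; bulk split/join and one comprehension replace per-character Python-level loop iterations.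
import Mathlib
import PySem

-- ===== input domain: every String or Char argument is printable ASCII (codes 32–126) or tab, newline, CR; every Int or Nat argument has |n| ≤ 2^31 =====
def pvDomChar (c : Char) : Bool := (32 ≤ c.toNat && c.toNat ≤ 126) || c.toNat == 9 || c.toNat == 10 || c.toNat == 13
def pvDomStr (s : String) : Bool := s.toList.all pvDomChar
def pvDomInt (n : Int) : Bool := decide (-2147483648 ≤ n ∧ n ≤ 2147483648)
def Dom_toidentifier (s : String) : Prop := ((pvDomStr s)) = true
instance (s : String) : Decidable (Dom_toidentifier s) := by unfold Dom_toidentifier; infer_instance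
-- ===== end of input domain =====

-- B replaces A's index-based scanning loop with '_X' lookahead by split-on-'_X',
-- per-byte escape of each segment, and rejoin with '_X_' (objective: alternative).
-- Equivalence is proved on Dom (ASCII input); on str input both operate on its latin-1 bytes.

-- ===== PORT A =====
-- _hexdigit: nibble to uppercase hex digit
def pvHexdigitA (v : Nat) : Char :=
  let v := v &&& 0xF
  if v ≥ 10 then Char.ofNat (v - 10 + 'A'.toNat) else Char.ofNat (v + '0'.toNat)

-- the while-loop of A: at each position, '_X' lookahead first, then safe char, else escape
def pvLoopA : List Char → List (List Char)
  | [] => []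
  | c :: rest =>
    if c = '_' ∧ rest.head? = some 'X' then
      ['_', 'X', '_'] :: pvLoopA rest.tail
    else if (c.toNat < 128 ∧ PySem.Chars.isalnum c = true) ∨ c = '_' then
      [c] :: pvLoopA rest
    else
      ['_', 'X'] :: [pvHexdigitA ((c.toNat &&& 0xF0) >>> 4)] :: [pvHexdigitA (c.toNat &&& 0x0F)] :: pvLoopA rest
  termination_by l => l.length
  decreasing_by all_goals simp [List.length_tail]

def toidentifier (s : String) : String :=
  String.ofList (pvLoopA s.toList).flatten

-- ===== PORT B =====
-- safe byte: 0-9 A-Z a-z _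
def pvSafeB (b : Nat) : Bool :=
  (48 ≤ b && b ≤ 57) || (65 ≤ b && b ≤ 90) || (97 ≤ b && b ≤ 122) || b == 0x5F

-- '%X' hex digit (uppercase)
def pvHexB (v : Nat) : Char :=
  if v ≥ 10 then Char.ofNat ('A'.toNat + v - 10) else Char.ofNat ('0'.toNat + v)

-- esc: per-byte comprehension, '_X%02X' for an unsafe byte
def pvEscB (seg : List Char) : List Char :=
  (seg.map (fun c =>
    if pvSafeB c.toNat then [c]
    else ['_', 'X', pvHexB (c.toNat / 16), pvHexB (c.toNat % 16)])).flatten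

-- s.split(b'_X')
def pvSplitB : List Char → List (List Char)
  | [] => [[]]
  | c :: rest =>
    if c = '_' ∧ rest.head? = some 'X' then
      [] :: pvSplitB rest.tail
    else
      match pvSplitB rest with
      | [] => [[c]]
      | seg :: segs => (c :: seg) :: segs
  termination_by l => l.length
  decreasing_by all_goals simp [List.length_tail]

-- '_X_'.join
def pvJoinB : List (List Char) → List Char
  | [] => []
  | [x] => x
  | x :: y :: ys => x ++ ['_', 'X', '_'] ++ pvJoinB (y :: ys)

def toidentifier_alt (s : String) : String :=
  String.ofList (pvJoinB ((pvSplitB s.toList).map pvEscB))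

-- ===== PRECONDITION & SPEC =====
def Spec_toidentifier (s : String) (out : String) : Prop := out = toidentifier_alt s
instance (s : String) (out : String) : Decidable (Spec_toidentifier s out) := by unfold Spec_toidentifier; infer_instance

-- ===== CLAIM (what is proved, stated in full; the proofs are below) =====
def Claim_equal_toidentifier : Prop := ∀ (s : String), Dom_toidentifier s → Spec_toidentifier s (toidentifier s)

-- ===== LEMMAS AND PROOFS =====

lemma pvSplitB_ne_nil (l : List Char) : pvSplitB l ≠ [] := by
  induction l using pvSplitB.induct with
  | case1 => simp [pvSplitB]
  | case2 c rest h ih => simp [pvSplitB, h]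
  | case3 c rest h heq => simp [pvSplitB, h, heq]
  | case4 c rest h seg segs heq ih => simp [pvSplitB, h, heq]

lemma pvJoinB_cons_append (a b : List Char) (xs : List (List Char)) :
    pvJoinB ((a ++ b) :: xs) = a ++ pvJoinB (b :: xs) := by
  cases xs with
  | nil => simp [pvJoinB]
  | cons y ys => simp [pvJoinB]

-- the per-character facts relating A's tests/escapes with B's, for ASCII codes
lemma pvCharKey (c : Char) (h : c.toNat < 128) :
    ((((c.toNat < 128 ∧ PySem.Chars.isalnum c = true) ∨ c = '_') ↔ pvSafeB c.toNat = true)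
     ∧ pvHexdigitA ((c.toNat &&& 0xF0) >>> 4) = pvHexB (c.toNat / 16)
     ∧ pvHexdigitA (c.toNat &&& 0x0F) = pvHexB (c.toNat % 16)) := by
  have key : ∀ n : Nat, n < 128 →
      ((((Char.ofNat n).toNat < 128 ∧ PySem.Chars.isalnum (Char.ofNat n) = true) ∨ Char.ofNat n = '_')
        ↔ pvSafeB (Char.ofNat n).toNat = true)
      ∧ pvHexdigitA (((Char.ofNat n).toNat &&& 0xF0) >>> 4) = pvHexB ((Char.ofNat n).toNat / 16)
      ∧ pvHexdigitA ((Char.ofNat n).toNat &&& 0x0F) = pvHexB ((Char.ofNat n).toNat % 16) := by decide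
  have := key c.toNat h
  rwa [Char.ofNat_toNat] at this

lemma pvMain : ∀ n (l : List Char), l.length ≤ n → (∀ c ∈ l, c.toNat < 128) →
    (pvLoopA l).flatten = pvJoinB ((pvSplitB l).map pvEscB) := by
  intro n
  induction n with
  | zero =>
    intro l hl _
    have : l = [] := List.eq_nil_of_length_eq_zero (Nat.le_zero.mp hl)
    subst this
    simp [pvLoopA, pvSplitB, pvJoinB, pvEscB]
  | succ n ih =>
    intro l hl hdom
    cases l with
    | nil => simp [pvLoopA, pvSplitB, pvJoinB, pvEscB]
    | cons c rest =>
      by_cases hx : c = '_' ∧ rest.head? = some 'X'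
      · -- '_X' match: A emits '_X_', B's split opens a new (empty) segment
        obtain ⟨hc, hh⟩ := hx
        cases rest with
        | nil => simp at hh
        | cons d rest' =>
          have hd : d = 'X' := by simpa using hh
          subst hc hd
          obtain ⟨seg, segs, hss⟩ := List.exists_cons_of_ne_nil (pvSplitB_ne_nil rest')
          have ihr := ih rest' (by simp at hl; omega)
            (fun c hc => hdom c (by simp [hc]))
          rw [hss] at ihr
          have hA : pvLoopA ('_'::'X'::rest') = ['_','X','_'] :: pvLoopA rest' := by
            rw [pvLoopA, if_pos (⟨rfl, rfl⟩ : ('_' : Char) = '_' ∧ ('X'::rest').head? = some 'X'), List.tail_cons]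
          have hS : pvSplitB ('_'::'X'::rest') = [] :: pvSplitB rest' := by
            rw [pvSplitB, if_pos (⟨rfl, rfl⟩ : ('_' : Char) = '_' ∧ ('X'::rest').head? = some 'X'), List.tail_cons]
          rw [hA, hS, hss]
          simp only [List.map_cons, List.flatten_cons]
          rw [show pvJoinB (pvEscB [] :: pvEscB seg :: segs.map pvEscB)
                = pvEscB [] ++ ['_','X','_'] ++ pvJoinB (pvEscB seg :: segs.map pvEscB) from rfl]
          simp [pvEscB, ihr]
      · -- no '_X' at this position
        have hc128 : c.toNat < 128 := hdom c (by simp)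
        obtain ⟨hsafe_iff, hhex1, hhex2⟩ := pvCharKey c hc128
        obtain ⟨seg, segs, hss⟩ := List.exists_cons_of_ne_nil (pvSplitB_ne_nil rest)
        have ihr := ih rest (by simp at hl; omega) (fun c hc => hdom c (by simp [hc]))
        rw [hss] at ihr
        have hsplit : pvSplitB (c :: rest) = (c :: seg) :: segs := by
          rw [pvSplitB, if_neg hx, hss]
        by_cases hs : (c.toNat < 128 ∧ PySem.Chars.isalnum c = true) ∨ c = '_'
        · have hsB : pvSafeB c.toNat = true := hsafe_iff.mp hs
          rw [pvLoopA, if_neg hx, if_pos hs]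
          rw [hsplit]
          simp only [List.map_cons, List.flatten_cons]
          have : pvEscB (c :: seg) = [c] ++ pvEscB seg := by
            simp [pvEscB, hsB]
          rw [this, pvJoinB_cons_append]
          simp [ihr]
        · have hsB : pvSafeB c.toNat = false := by
            cases hb : pvSafeB c.toNat with
            | false => rfl
            | true => exact absurd (hsafe_iff.mpr hb) hs
          rw [pvLoopA, if_neg hx, if_neg hs]
          rw [hsplit]
          simp only [List.map_cons, List.flatten_cons]
          have : pvEscB (c :: seg) = ['_','X', pvHexB (c.toNat / 16), pvHexB (c.toNat % 16)] ++ pvEscB seg := by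
            simp [pvEscB, hsB]
          rw [this, pvJoinB_cons_append]
          simp [ihr, hhex1, hhex2]

-- ===== VERDICT (by name: the statement is the Claim_ definition above) =====
theorem toidentifier_spec : Claim_equal_toidentifier := by
  intro s hdom
  unfold Spec_toidentifier toidentifier toidentifier_alt
  congr 1
  apply pvMain s.toList.length _ le_rfl
  intro c hc
  have := List.all_eq_true.mp hdom c hc
  simp [pvDomChar] at this
  omega
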